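-- pv_equiv track=rewrite | github.com/akpenou/expert_system | expert_system.py | init_symbols
-- ===== SOURCE A (Python) =====
-- def init_symbols(sym, fact):
-- 	"""
-- 		dict(str: bool) * list(str) -> dict(str: bool)
-- 		return the symbols tab with facts initialized
-- 	"""
-- 	res = dict()
-- 	for s in sym:
-- 		if s in fact:
-- 			res[s] = [True, True]
-- 		else:
-- 			res[s] = [False, False]
-- 	return res
-- ===== SOURCE B (Python) =====
-- def init_symbols(sym, fact):
--     res = {s: [False, False] for s in sym}
--     for f in fact:
--         if f in res:
--             res[f] = [True, True]
--     return res
-- ===== Notes on version B (the rewrite author's own statement) =====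
-- stated objective: faster
-- what changed: Reversed the driving collection: instead of testing each symbol against the facts list (a linear scan per symbol), B builds the table once over sym and then marks each fact by a hash lookup.
import Mathlib
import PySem

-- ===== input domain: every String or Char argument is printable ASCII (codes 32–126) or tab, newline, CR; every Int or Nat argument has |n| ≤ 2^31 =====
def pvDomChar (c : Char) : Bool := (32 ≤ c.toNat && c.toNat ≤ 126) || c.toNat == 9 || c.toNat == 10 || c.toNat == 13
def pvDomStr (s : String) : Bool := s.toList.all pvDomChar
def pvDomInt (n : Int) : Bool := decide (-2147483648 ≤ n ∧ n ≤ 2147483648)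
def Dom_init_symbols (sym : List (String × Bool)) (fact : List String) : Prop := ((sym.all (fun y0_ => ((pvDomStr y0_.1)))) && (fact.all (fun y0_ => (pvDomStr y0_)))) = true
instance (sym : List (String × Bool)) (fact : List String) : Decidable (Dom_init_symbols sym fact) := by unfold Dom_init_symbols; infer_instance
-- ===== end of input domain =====

-- B reverses the driving collection: it initializes every symbol to [false,false] in one pass
-- over sym, then marks each fact present in the table by a single lookup (no per-symbol scan of fact).


-- ===== PORT A =====
-- for s in sym: res[s] = [True,True] if s in fact else [False,False]
def init_symbols (sym : List (String × Bool)) (fact : List String) : List (String × List Bool) :=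
  (sym.foldl (fun (res : PySem.Dict String (List Bool)) s =>
      if fact.contains s.1 then res.insert s.1 [true, true]
      else res.insert s.1 [false, false]) PySem.Dict.empty).items

-- ===== PORT B =====
-- second pass of B: for f in fact: if f in res: res[f] = [True, True]
def markFacts (fact : List String) (res : PySem.Dict String (List Bool)) : PySem.Dict String (List Bool) :=
  fact.foldl (fun res f => if res.contains f then res.insert f [true, true] else res) res

def init_symbols_alt (sym : List (String × Bool)) (fact : List String) : List (String × List Bool) :=
  (markFacts fact
    (sym.foldl (fun (res : PySem.Dict String (List Bool)) s =>
      res.insert s.1 [false, false]) PySem.Dict.empty)).items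

-- ===== PRECONDITION & SPEC =====
def Spec_init_symbols (sym : List (String × Bool)) (fact : List String) (out : List (String × List Bool)) : Prop := out = init_symbols_alt sym fact
instance (sym : List (String × Bool)) (fact : List String) (out : List (String × List Bool)) : Decidable (Spec_init_symbols sym fact out) := by unfold Spec_init_symbols; infer_instance

-- ===== CLAIM (what is proved, stated in full; the proofs are below) =====
def Claim_equal_init_symbols : Prop := ∀ (sym : List (String × Bool)) (fact : List String), Dom_init_symbols sym fact → Spec_init_symbols sym fact (init_symbols sym fact)

-- ===== LEMMAS AND PROOFS =====

-- two inserts at distinct keys commute when the second key is already present (its insert is an overwrite)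
lemma insert_comm_of_contains (d : PySem.Dict String (List Bool)) (s f : String)
    (w v : List Bool) (hne : f ≠ s) (hf : d.contains f = true) :
    (d.insert s w).insert f v = (d.insert f v).insert s w := by
  apply PySem.Dict.ext
  have hf' : (d.insert s w).contains f = true := by
    rw [PySem.Dict.contains_insert, hf]; simp
  by_cases hs : d.contains s = true
  · have hs' : (d.insert f v).contains s = true := by
      rw [PySem.Dict.contains_insert, hs]; simp
    rw [PySem.Dict.items_insert_of_contains _ _ hf',
        PySem.Dict.items_insert_of_contains _ _ hs,
        PySem.Dict.items_insert_of_contains _ _ hs',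
        PySem.Dict.items_insert_of_contains _ _ hf]
    simp only [List.map_map]
    apply List.map_congr_left
    intro p _
    by_cases h1 : p.1 = s
    · simp [Function.comp, h1, hne, Ne.symm hne]
    · by_cases h2 : p.1 = f <;> simp [Function.comp, h1, h2, hne, Ne.symm hne]
  · have hs0 : d.contains s = false := by simpa using hs
    have hs' : (d.insert f v).contains s = false := by
      rw [PySem.Dict.contains_insert, hs0]
      simp [Ne.symm hne]
    rw [PySem.Dict.items_insert_of_contains _ _ hf',
        PySem.Dict.items_insert_of_not_contains _ _ hs0,
        PySem.Dict.items_insert_of_not_contains _ _ hs',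
        PySem.Dict.items_insert_of_contains _ _ hf]
    simp [hne, Ne.symm hne]

-- marking commutes with a single insert: the inserted key ends up marked iff it is a fact
lemma markFacts_insert (fact : List String) (d : PySem.Dict String (List Bool))
    (s : String) (w : List Bool) :
    markFacts fact (d.insert s w)
      = (markFacts fact d).insert s (if fact.contains s then [true, true] else w) := by
  induction fact generalizing d w with
  | nil => simp [markFacts]
  | cons f fs ih =>
    simp only [markFacts, List.foldl_cons] at *
    by_cases hfs : f = s
    · subst hfs
      have hc : (d.insert f w).contains f = true := PySem.Dict.contains_insert_self d f w
      rw [if_pos hc, PySem.Dict.insert_insert_self, ih]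
      by_cases hd : d.contains f = true
      · rw [if_pos hd, ih]
        simp [PySem.Dict.insert_insert_self]
      · rw [if_neg hd]
        simp
    · have hc : (d.insert s w).contains f = d.contains f := by
        rw [PySem.Dict.contains_insert]
        simp [hfs]
      have hmem : (f :: fs).contains s = fs.contains s := by
        simp [Ne.symm hfs]
      by_cases hd : d.contains f = true
      · rw [hc, if_pos hd, if_pos hd,
            insert_comm_of_contains d s f w [true, true] hfs hd, ih, hmem]
      · rw [hc, if_neg hd, if_neg hd, ih, hmem]

lemma markFacts_empty (fact : List String) :
    markFacts fact PySem.Dict.empty = PySem.Dict.empty := by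
  induction fact with
  | nil => rfl
  | cons f fs ih =>
    simp only [markFacts, List.foldl_cons] at *
    rw [PySem.Dict.contains_empty]
    simpa using ih

-- marking after the init fold equals A's combined fold started from the marked accumulator
lemma mark_init_eq_afold (fact : List String) (sym : List (String × Bool))
    (d : PySem.Dict String (List Bool)) :
    markFacts fact (sym.foldl (fun res s => res.insert s.1 [false, false]) d)
      = sym.foldl (fun res s =>
          if fact.contains s.1 then res.insert s.1 [true, true]
          else res.insert s.1 [false, false]) (markFacts fact d) := by
  induction sym generalizing d with
  | nil => rfl
  | cons p ps ih =>
    simp only [List.foldl_cons]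
    rw [ih, markFacts_insert]
    by_cases h : fact.contains p.1 = true
    · rw [if_pos h, if_pos h]
    · rw [if_neg h, if_neg h]

-- ===== VERDICT (by name: the statement is the Claim_ definition above) =====
theorem init_symbols_spec : Claim_equal_init_symbols := by
  intro sym fact _
  unfold Spec_init_symbols init_symbols init_symbols_alt
  rw [mark_init_eq_afold, markFacts_empty]
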